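-- pv_equiv track=rewrite | github.com/daitran1412/PyLearn | tests.py | correct_dec5
-- ===== SOURCE A (Python) =====
-- def correct_dec5(n):
--     arr = n.split(",")
--     array = []
--     for i in arr:
--         a = list(i)
--         a = a[::-1]
--         m = 0
--         for j in range(0, len(a)):
--              m += (2**int(j))* int(a[j])
--         if m % 5 == 0:
--             array.append(i)
--     return(",".join(array))
-- ===== SOURCE B (Python) =====
-- def correct_dec5(n):
--     def rem5(piece):
--         r = 0
--         for ch in piece:
--             r = (r * 2 + int(ch)) % 5
--         return r
--     return ",".join(p for p in n.split(",") if rem5(p) == 0)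
-- ===== Notes on version B (the rewrite author's own statement) =====
-- stated objective: idiomatic
-- what changed: Replaces A's reverse-the-piece-and-sum-powers-of-two pass (building the full integer) with a single left-to-right Horner pass keeping only the running remainder mod 5, and the accumulate-then-append loop with a filter comprehension.
import Mathlib
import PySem

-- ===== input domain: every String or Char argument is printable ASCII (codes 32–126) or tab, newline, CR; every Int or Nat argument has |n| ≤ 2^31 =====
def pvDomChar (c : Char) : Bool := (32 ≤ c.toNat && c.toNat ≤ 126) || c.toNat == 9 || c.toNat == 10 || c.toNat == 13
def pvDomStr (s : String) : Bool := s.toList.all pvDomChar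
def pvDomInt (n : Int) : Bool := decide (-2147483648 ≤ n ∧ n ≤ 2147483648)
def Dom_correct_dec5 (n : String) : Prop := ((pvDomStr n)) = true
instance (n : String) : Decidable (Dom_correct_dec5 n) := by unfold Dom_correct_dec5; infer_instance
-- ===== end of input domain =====

-- B replaces A's reverse-and-sum-powers-of-two pass (building the full integer) with a
-- left-to-right Horner pass keeping only the running remainder mod 5 (objective: idiomatic).

-- ===== PORT A =====
-- '(PySem.Int.ofChars? [c]).getD 0' ports int(a[j]): the 'getD 0' default is reached only on
-- non-digit characters, where Python raises ValueError — such inputs are excluded by Pre_.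
def correct_dec5 (n : String) : String :=
  let arr := (PySem.Str.split? n ",").getD []   -- sep "," is non-empty, so split? is always some
  let array := arr.foldl (fun array i =>
    let a := i.toList
    let a := (PySem.List.slice? a none none (-1)).getD []   -- a[::-1]; step = -1 always succeeds
    let m := (PySem.List.pyRange 0 (a.length : Int) 1).foldl
      (fun m j => m + 2 ^ j.toNat * ((PySem.Int.ofChars? [PySem.List.pyGetD a j ' ']).getD 0)) 0
    if PySem.Int.mod m 5 = 0 then array ++ [i] else array) []
  PySem.Str.join "," array

-- ===== PORT B =====
def pvRem5 (piece : String) : Int :=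
  piece.toList.foldl (fun r ch => PySem.Int.mod (r * 2 + (PySem.Int.ofChars? [ch]).getD 0) 5) 0

def correct_dec5_alt (n : String) : String :=
  PySem.Str.join "," (((PySem.Str.split? n ",").getD []).filter (fun p => pvRem5 p == 0))

-- ===== PRECONDITION & SPEC =====
-- Pre_ excludes exactly the inputs where Python A raises ValueError: a character that is
-- neither an ASCII digit nor the comma separator makes int(ch) raise.
def Pre_correct_dec5 (n : String) : Prop :=
  (n.toList.all (fun c => c.isDigit || c == ',')) = true
instance (n : String) : Decidable (Pre_correct_dec5 n) := by unfold Pre_correct_dec5; infer_instance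
def pvWitness_correct_dec5 : String := "1010,11,5,"

def Spec_correct_dec5 (n : String) (out : String) : Prop := out = correct_dec5_alt n
instance (n : String) (out : String) : Decidable (Spec_correct_dec5 n out) := by unfold Spec_correct_dec5; infer_instance

-- ===== CLAIM (what is proved, stated in full; the proofs are below) =====
def Claim_equal_correct_dec5 : Prop := ∀ (n : String), Dom_correct_dec5 n → Pre_correct_dec5 n → Spec_correct_dec5 n (correct_dec5 n)

-- ===== LEMMAS AND PROOFS =====
def pvDig (c : Char) : Int := (PySem.Int.ofChars? [c]).getD 0
def pvVal (ds : List Int) : Int := ds.foldl (fun v d => v * 2 + d) 0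

lemma pvVal_shift (ds : List Int) (v : Int) :
    ds.foldl (fun v d => v * 2 + d) v = v * 2 ^ ds.length + pvVal ds := by
  induction ds generalizing v with
  | nil => simp [pvVal]
  | cons d ds ih =>
    simp only [List.foldl_cons, List.length_cons, pvVal] at *
    rw [ih, ih (0 * 2 + d)]
    ring

lemma pvHorner (ds : List Int) (r v : Int) (h : r = PySem.Int.mod v 5) :
    ds.foldl (fun r d => PySem.Int.mod (r * 2 + d) 5) r
      = PySem.Int.mod (ds.foldl (fun v d => v * 2 + d) v) 5 := by
  induction ds generalizing r v with
  | nil => simpa using h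
  | cons d ds ih =>
    simp only [List.foldl_cons]
    apply ih
    rw [h]
    simp only [PySem.Int.mod_eq_emod_of_pos (by norm_num : (0:Int) < 5)]
    omega

lemma pvSum (cs : List Char) :
    (PySem.List.pyRange 0 (cs.length : Int) 1).foldl
      (fun m j => m + 2 ^ j.toNat * ((PySem.Int.ofChars? [PySem.List.pyGetD cs j ' ']).getD 0)) 0
      = pvVal ((cs.map pvDig).reverse) := by
  induction cs using List.reverseRecOn with
  | nil => simp [PySem.List.pyRange_one_eq_nil (by norm_num : (0:Int) ≤ 0), pvVal]
  | append_singleton b c ih =>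
    have hlen : (((b ++ [c]).length : Nat) : Int) = (b.length : Int) + 1 := by
      simp
    rw [hlen, PySem.List.pyRange_one_succ_right (by positivity), List.foldl_append]
    have hseg : ∀ (acc : Int), ∀ j ∈ PySem.List.pyRange 0 (b.length : Int) 1,
        acc + 2 ^ j.toNat * ((PySem.Int.ofChars? [PySem.List.pyGetD (b ++ [c]) j ' ']).getD 0)
          = acc + 2 ^ j.toNat * ((PySem.Int.ofChars? [PySem.List.pyGetD b j ' ']).getD 0) := by
      intro acc j hj
      rw [PySem.List.mem_pyRange_one] at hj
      have hjn : j.toNat < b.length := by omega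
      rw [PySem.List.pyGetD_of_nonneg _ _ hj.1, PySem.List.pyGetD_of_nonneg _ _ hj.1,
          List.getD_eq_getElem?_getD, List.getD_eq_getElem?_getD,
          List.getElem?_append_left hjn]
    rw [PySem.List.foldl_congr_mem _ _ _ _ hseg, ih]
    have hlast : PySem.List.pyGetD (b ++ [c]) (b.length : Int) ' ' = c := by
      rw [PySem.List.pyGetD_natCast]
      simp
    simp only [List.foldl_cons, List.foldl_nil]
    rw [hlast]
    simp only [List.map_append, List.map_cons, List.map_nil, List.reverse_append,
      List.reverse_cons, List.reverse_nil, List.nil_append, List.singleton_append]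
    simp only [pvVal, List.foldl_cons]
    rw [pvVal_shift]
    simp only [List.length_reverse, List.length_map, Int.toNat_natCast, pvDig, pvVal]
    rw [pvVal_shift ((List.map pvDig b).reverse) (0 * 2 + (PySem.Int.ofChars? [c]).getD 0)]
    simp only [List.length_reverse, List.length_map, pvVal]
    ring

lemma pvRem5_eq (p : String) :
    pvRem5 p = PySem.Int.mod (pvVal (p.toList.map pvDig)) 5 := by
  unfold pvRem5 pvVal
  show p.toList.foldl (fun r ch => PySem.Int.mod (r * 2 + pvDig ch) 5) 0
      = PySem.Int.mod (List.foldl (fun v d => v * 2 + d) 0 (List.map pvDig p.toList)) 5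
  rw [← List.foldl_map (g := fun r d => PySem.Int.mod (r * 2 + d) 5) (f := pvDig)
        (l := p.toList)]
  exact pvHorner _ 0 0 (by simp [PySem.Int.mod])

-- ===== VERDICT (by name: the statement is the Claim_ definition above) =====
theorem correct_dec5_spec : Claim_equal_correct_dec5 := by
  intro n _ _
  unfold Spec_correct_dec5 correct_dec5 correct_dec5_alt
  simp only []
  congr 1
  rw [PySem.List.foldl_append_ite_eq_filter, List.nil_append]
  apply List.filter_congr
  intro i _
  have hm : (PySem.List.pyRange 0
        (((PySem.List.slice? i.toList none none (-1)).getD []).length : Int) 1).foldl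
      (fun m j => m + 2 ^ j.toNat *
        ((PySem.Int.ofChars? [PySem.List.pyGetD
            ((PySem.List.slice? i.toList none none (-1)).getD []) j ' ']).getD 0)) 0
      = pvVal (i.toList.map pvDig) := by
    rw [PySem.List.slice?_none_none_neg_one, Option.getD_some, pvSum]
    simp [List.map_reverse]
  rw [hm, pvRem5_eq, Bool.eq_iff_iff]
  simp [beq_iff_eq]
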